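-- pv_equiv track=rewrite | github.com/tsuru7/algorithm-study | AtCoder/ABC/201-300/ABC287/D.py | solve
-- ===== SOURCE A (Python) =====
-- def solve(s, t):
--     lens = len(s)
--     lent = len(t)
--     pre = [True for _ in range(lent+1)]
--     post = [True for _ in range(lent+1)]
--
--     for i in range(lent)[::-1]:
--         if s[lens-lent+i] == t[i] or s[lens-lent+i] == '?' or t[i] == '?':
--             pre[i] = pre[i+1]
--         else:
--             pre[i] = False
--
--     for i in range(lent):
--         if s[i] == t[i] or s[i] == '?' or t[i] == '?':
--             post[i+1] = post[i]
--         else: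
--             post[i+1] = False
--
--     ans = ['Yes' if post[i] and pre[i] else 'No' for i in range(lent+1)]
--
--     return ans
-- ===== SOURCE B (Python) =====
-- def solve(s, t):
--     lens = len(s)
--     lent = len(t)
--     d = lens - lent
--
--     def ok(a, b):
--         return a == b or a == '?' or b == '?'
--
--     # P = length of the longest valid prefix (first mismatch index, or lent)
--     P = lent
--     for i, (a, b) in enumerate(zip(s, t)):
--         if not ok(a, b):
--             P = i
--             break
--
--     # Q = 1 + highest suffix-aligned index that mismatches (0 if none)
--     Q = 0
--     for i, (a, b) in enumerate(zip(s[d:], t)):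
--         if not ok(a, b):
--             Q = i + 1
--
--     return ['Yes' if Q <= i <= P else 'No' for i in range(lent + 1)]
-- ===== Notes on version B (the rewrite author's own statement) =====
-- stated objective: simpler
-- what changed: B replaces A's two (lent+1)-sized boolean arrays (built by a backward and a forward stamping loop, then ANDed per position) with two integer thresholds: P = longest valid prefix (first-mismatch scan with break) and Q = 1 + last suffix-aligned mismatch, answering each i by the single range test Q <= i <= P.
-- outside the precondition, e.g. on solve('a', 'ab'): A raises IndexError, B returns ['Yes', 'Yes', 'Yes']
import Mathlib
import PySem

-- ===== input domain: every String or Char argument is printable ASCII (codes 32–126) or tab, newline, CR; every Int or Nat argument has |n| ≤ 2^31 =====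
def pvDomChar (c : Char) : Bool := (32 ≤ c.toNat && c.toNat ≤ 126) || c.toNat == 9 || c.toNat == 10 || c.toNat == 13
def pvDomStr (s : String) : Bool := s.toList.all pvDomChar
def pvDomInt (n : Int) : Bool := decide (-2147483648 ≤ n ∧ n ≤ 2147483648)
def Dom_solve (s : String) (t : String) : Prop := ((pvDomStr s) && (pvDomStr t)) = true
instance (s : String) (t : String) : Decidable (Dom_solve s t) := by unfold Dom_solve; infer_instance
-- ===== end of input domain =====

-- B replaces A's two boolean arrays by two integer thresholds P (longest valid prefix) and
-- Q (1 + last suffix-aligned mismatch) and answers each i by the range test Q ≤ i ≤ P (simpler).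

-- ===== PORT A =====
-- the wildcard comparison 's[...] == t[i] or s[...] == '?' or t[i] == '?''
def okC (a : Char) (b : Char) : Bool := a == b || a == '?' || b == '?'

def solve (s : String) (t : String) : List String :=
  let sc := s.toList
  let tc := t.toList
  let lens := sc.length
  let lent := tc.length
  let pre0 : List Bool := List.replicate (lent+1) true
  let post0 : List Bool := List.replicate (lent+1) true
  -- for i in range(lent)[::-1]:  (indices lent-1 down to 0)
  let pre := ((List.range lent).reverse).foldl
    (fun pre i =>
      if okC (sc.getD (lens - lent + i) ' ') (tc.getD i ' ')
      then pre.set i (pre.getD (i+1) true)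
      else pre.set i false) pre0
  -- for i in range(lent):
  let post := (List.range lent).foldl
    (fun post i =>
      if okC (sc.getD i ' ') (tc.getD i ' ')
      then post.set (i+1) (post.getD i true)
      else post.set (i+1) false) post0
  (List.range (lent+1)).map (fun i => if post.getD i true && pre.getD i true then "Yes" else "No")

-- ===== PORT B =====
-- Source B's local 'ok(a, b)'
def okB (a : Char) (b : Char) : Bool := a == b || a == '?' || b == '?'

-- P: first mismatch index while zipping s with t (or lent if none): the break-loop of Source B
def findP (lent : Nat) : List Char → List Char → Nat → Nat
  | a :: as, b :: bs, i => if okB a b then findP lent as bs (i+1) else i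
  | _, _, _ => lent

-- Q: last mismatch index + 1 while zipping s[d:] with t (0 if none)
def findQ : List Char → List Char → Nat → Nat → Nat
  | a :: as, b :: bs, i, q => findQ as bs (i+1) (if okB a b then q else i+1)
  | _, _, _, q => q

def solve_alt (s : String) (t : String) : List String :=
  let sc := s.toList
  let tc := t.toList
  let lens := sc.length
  let lent := tc.length
  let d : Int := (lens : Int) - (lent : Int)
  let P := findP lent sc tc 0
  let Q := findQ (PySem.List.slice sc (some d) none) tc 0 0   -- s[d:]
  (List.range (lent+1)).map (fun i => if Q ≤ i ∧ i ≤ P then "Yes" else "No")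

-- ===== PRECONDITION & SPEC =====
-- A raises IndexError whenever len(t) > len(s) (s[i] with i ≥ len(s), or a negative-index
-- overflow in the first loop); Pre_ is exactly the inputs on which A returns.
def Pre_solve (s : String) (t : String) : Prop := t.length ≤ s.length
instance (s : String) (t : String) : Decidable (Pre_solve s t) := by unfold Pre_solve; infer_instance
def pvWitness_solve : String × String := ("ab?cd", "a?d")

def Spec_solve (s : String) (t : String) (out : List String) : Prop := out = solve_alt s t
instance (s : String) (t : String) (out : List String) : Decidable (Spec_solve s t out) := by unfold Spec_solve; infer_instance

-- ===== CLAIM (what is proved, stated in full; the proofs are below) =====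
def Claim_equal_solve : Prop := ∀ (s : String) (t : String), Dom_solve s t → Pre_solve s t → Spec_solve s t (solve s t)

-- ===== LEMMAS AND PROOFS =====

theorem decide_congr {p q : Prop} [Decidable p] [Decidable q] (h : p ↔ q) : decide p = decide q :=
  decide_eq_decide.mpr h

theorem okB_eq_okC (a b : Char) : okB a b = okC a b := rfl

theorem getD_replicate_true (L i : Nat) : (List.replicate L true).getD i true = true := by
  rw [List.getD, List.getElem?_replicate]
  split <;> rfl

-- prefix predicate: all positions k < i match (prefix-aligned)
def Pall (sc tc : List Char) (i : Nat) : Bool :=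
  decide (∀ k, k < i → okC (sc.getD k ' ') (tc.getD k ' ') = true)

-- suffix predicate: all positions k with i ≤ k < n match (suffix-aligned by d)
def Suf (sc tc : List Char) (d i n : Nat) : Bool :=
  decide (∀ k, i ≤ k → k < n → okC (sc.getD (d+k) ' ') (tc.getD k ' ') = true)

theorem Pall_succ (sc tc : List Char) (n : Nat) :
    Pall sc tc (n+1) = (okC (sc.getD n ' ') (tc.getD n ' ') && Pall sc tc n) := by
  simp only [Pall]
  by_cases h : okC (sc.getD n ' ') (tc.getD n ' ') = true
  · simp only [h, Bool.true_and]
    apply decide_congr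
    constructor
    · intro hh k hk; exact hh k (Nat.lt_succ_of_lt hk)
    · intro hh k hk
      rcases Nat.lt_succ_iff_lt_or_eq.mp hk with h' | h'
      · exact hh k h'
      · subst h'; exact h
  · simp only [Bool.not_eq_true] at h
    simp only [h, Bool.false_and, decide_eq_false_iff_not]
    intro hh
    have := hh n (Nat.lt_succ_self n)
    rw [this] at h
    exact Bool.noConfusion h

theorem Suf_succ (sc tc : List Char) (d i n : Nat) (hi : i ≤ n) :
    Suf sc tc d i (n+1) = (okC (sc.getD (d+n) ' ') (tc.getD n ' ') && Suf sc tc d i n) := by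
  simp only [Suf]
  by_cases h : okC (sc.getD (d+n) ' ') (tc.getD n ' ') = true
  · simp only [h, Bool.true_and]
    apply decide_congr
    constructor
    · intro hh k hk1 hk2; exact hh k hk1 (Nat.lt_succ_of_lt hk2)
    · intro hh k hk1 hk2
      rcases Nat.lt_succ_iff_lt_or_eq.mp hk2 with h' | h'
      · exact hh k hk1 h'
      · subst h'; exact h
  · simp only [Bool.not_eq_true] at h
    simp only [h, Bool.false_and, decide_eq_false_iff_not]
    intro hh
    have := hh n hi (Nat.lt_succ_self n)
    rw [this] at h
    exact Bool.noConfusion h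

-- length is preserved by the array-updating folds
theorem foldl_set_length {α : Type} (f : List α → Nat → List α)
    (hf : ∀ l i, (f l i).length = l.length) (l : List α) (xs : List Nat) :
    (xs.foldl f l).length = l.length := by
  induction xs generalizing l with
  | nil => rfl
  | cons x xs ih => simp [List.foldl, ih, hf]

-- getD after set
theorem getD_set {α : Type} (l : List α) (i j : Nat) (v d : α) (hi : i < l.length) :
    (l.set i v).getD j d = if i = j then v else l.getD j d := by
  simp only [List.getD, List.getElem?_set, hi, if_true]
  split <;> simp_all

-- ---- characterisation of A's forward (post) fold ----

def postStep (sc tc : List Char) (post : List Bool) (i : Nat) : List Bool :=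
  if okC (sc.getD i ' ') (tc.getD i ' ')
  then post.set (i+1) (post.getD i true)
  else post.set (i+1) false

theorem postStep_length (sc tc : List Char) (post : List Bool) (i : Nat) :
    (postStep sc tc post i).length = post.length := by
  unfold postStep; split <;> simp

theorem post_fold_getD (sc tc : List Char) (L : Nat) (n : Nat) (hn : n ≤ L) :
    ∀ i, ((List.range n).foldl (postStep sc tc) (List.replicate (L+1) true)).getD i true
      = if i ≤ n then Pall sc tc i else true := by
  induction n with
  | zero =>
    intro i
    simp only [List.range_zero, List.foldl_nil]
    rw [getD_replicate_true]
    split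
    · have : i = 0 := Nat.le_zero.mp ‹i ≤ 0›
      subst this
      simp [Pall]
    · rfl
  | succ n ih =>
    intro i
    have hn' : n ≤ L := Nat.le_of_succ_le hn
    have hlen : ((List.range n).foldl (postStep sc tc) (List.replicate (L+1) true)).length = L+1 := by
      have := foldl_set_length (postStep sc tc) (postStep_length sc tc)
        (List.replicate (L+1) true) (List.range n)
      simpa using this
    rw [List.range_succ, List.foldl_append, List.foldl_cons, List.foldl_nil]
    set prev := (List.range n).foldl (postStep sc tc) (List.replicate (L+1) true) with hprev
    have hlt : n + 1 < prev.length := by omega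
    by_cases hi : i = n + 1
    · subst hi
      unfold postStep
      by_cases hc : okC (sc.getD n ' ') (tc.getD n ' ') = true
      · rw [if_pos hc, getD_set _ _ _ _ _ hlt, if_pos rfl, ih hn' n,
          if_pos (Nat.le_refl n), if_pos (Nat.le_refl (n+1)), Pall_succ, hc, Bool.true_and]
      · have hc' : okC (sc.getD n ' ') (tc.getD n ' ') = false := by simpa using hc
        rw [if_neg hc, getD_set _ _ _ _ _ hlt, if_pos rfl,
          if_pos (Nat.le_refl (n+1)), Pall_succ, hc', Bool.false_and]
    · have hstep : (postStep sc tc prev n).getD i true = prev.getD i true := by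
        unfold postStep
        split <;> rw [getD_set _ _ _ _ _ hlt, if_neg (by omega)]
      rw [hstep, ih hn' i]
      by_cases h2 : i ≤ n
      · rw [if_pos h2, if_pos (by omega)]
      · rw [if_neg h2, if_neg (by omega)]

-- ---- characterisation of A's backward (pre) fold ----

def preStep (sc tc : List Char) (d : Nat) (pre : List Bool) (i : Nat) : List Bool :=
  if okC (sc.getD (d + i) ' ') (tc.getD i ' ')
  then pre.set i (pre.getD (i+1) true)
  else pre.set i false

theorem preStep_length (sc tc : List Char) (d : Nat) (pre : List Bool) (i : Nat) :
    (preStep sc tc d pre i).length = pre.length := by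
  unfold preStep; split <;> simp

theorem pre_fold_getD (sc tc : List Char) (d : Nat) (n : Nat) (init : List Bool)
    (hlen : n < init.length) :
    ∀ i, (((List.range n).reverse).foldl (preStep sc tc d) init).getD i true
      = if i < n then (Suf sc tc d i n && init.getD n true) else init.getD i true := by
  induction n generalizing init with
  | zero =>
    intro i
    rw [List.range_zero, List.reverse_nil, List.foldl_nil, if_neg (Nat.not_lt_zero i)]
  | succ n ih =>
    intro i
    rw [List.range_succ, List.reverse_append, List.reverse_singleton, List.singleton_append,
      List.foldl_cons]
    set init' := preStep sc tc d init n with hinit'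
    have hlen' : n < init'.length := by
      rw [hinit', preStep_length]; omega
    have hltn : n < init.length := by omega
    have hval : init'.getD n true
        = (okC (sc.getD (d+n) ' ') (tc.getD n ' ') && init.getD (n+1) true) := by
      rw [hinit']; unfold preStep
      by_cases hc : okC (sc.getD (d+n) ' ') (tc.getD n ' ') = true
      · rw [if_pos hc, getD_set _ _ _ _ _ hltn, if_pos rfl, hc, Bool.true_and]
      · have hc' : okC (sc.getD (d+n) ' ') (tc.getD n ' ') = false := by simpa using hc
        rw [if_neg hc, getD_set _ _ _ _ _ hltn, if_pos rfl, hc', Bool.false_and]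
    have huntouched : ∀ j, n ≠ j → init'.getD j true = init.getD j true := by
      intro j hj
      rw [hinit']; unfold preStep
      split <;> rw [getD_set _ _ _ _ _ hltn, if_neg hj]
    rw [ih init' hlen' i]
    by_cases hi : i < n
    · rw [if_pos hi, if_pos (Nat.lt_succ_of_lt hi), hval,
        Suf_succ sc tc d i n (Nat.le_of_lt hi)]
      cases h1 : okC (sc.getD (d+n) ' ') (tc.getD n ' ') <;>
        cases h2 : Suf sc tc d i n <;> simp
    · by_cases hi' : i = n
      · subst hi'
        rw [if_neg (by omega), if_pos (Nat.lt_succ_self i), hval,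
          Suf_succ sc tc d i i (Nat.le_refl i)]
        have hsuf : Suf sc tc d i i = true := by
          simp only [Suf, decide_eq_true_iff]; intro k h1 h2; omega
        rw [hsuf]; simp
      · rw [if_neg hi, if_neg (by omega), huntouched i (by omega)]

-- ---- characterisation of B's findP ----

-- length of the longest ok-prefix of the zip
def misP : List Char → List Char → Nat
  | a :: as, b :: bs => if okC a b then misP as bs + 1 else 0
  | _, _ => 0

theorem findP_eq (L : Nat) : ∀ (as bs : List Char) (j : Nat),
    findP L as bs j = if misP as bs = min as.length bs.length then L else j + misP as bs := by
  intro as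
  induction as with
  | nil => intro bs j; cases bs <;> simp [findP, misP]
  | cons a as ih =>
    intro bs j
    cases bs with
    | nil => simp [findP, misP]
    | cons b bs =>
      simp only [findP, misP, okB_eq_okC]
      by_cases h : okC a b = true
      · rw [if_pos h, if_pos h, ih bs (j+1)]
        have : (misP as bs + 1 = min (as.length + 1) (bs.length + 1))
            = (misP as bs = min as.length bs.length) := by
          apply propext; omega
        simp only [List.length_cons, this]
        split <;> omega
      · simp only [Bool.not_eq_true] at h
        simp only [h, Bool.false_eq_true, if_false, List.length_cons]
        rw [if_neg (by omega)]
        omega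

theorem misP_le : ∀ (as bs : List Char), misP as bs ≤ min as.length bs.length := by
  intro as
  induction as with
  | nil => intro bs; cases bs <;> simp [misP]
  | cons a as ih =>
    intro bs
    cases bs with
    | nil => simp [misP]
    | cons b bs =>
      simp only [misP, List.length_cons]
      split
      · have := ih bs; omega
      · omega

theorem misP_ok : ∀ (as bs : List Char) (k : Nat), k < misP as bs →
    okC (as.getD k ' ') (bs.getD k ' ') = true := by
  intro as
  induction as with
  | nil => intro bs k h; cases bs <;> simp [misP] at h
  | cons a as ih =>
    intro bs k h
    cases bs with
    | nil => simp [misP] at h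
    | cons b bs =>
      simp only [misP] at h
      by_cases hok : okC a b = true
      · rw [if_pos hok] at h
        cases k with
        | zero => simpa [List.getD] using hok
        | succ k => simpa [List.getD] using ih bs k (by omega)
      · simp [hok] at h

theorem misP_mismatch : ∀ (as bs : List Char), misP as bs < min as.length bs.length →
    okC (as.getD (misP as bs) ' ') (bs.getD (misP as bs) ' ') = false := by
  intro as
  induction as with
  | nil => intro bs h; simp at h
  | cons a as ih =>
    intro bs h
    cases bs with
    | nil => simp at h
    | cons b bs =>
      simp only [misP] at h ⊢
      by_cases hok : okC a b = true
      · rw [if_pos hok] at h ⊢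
        simp only [List.length_cons] at h
        simpa [List.getD] using ih bs (by omega)
      · simp only [Bool.not_eq_true] at hok
        simp [hok, List.getD]

-- for i ≤ lent: decide (i ≤ P) = Pall sc tc i, given lent = tc.length ≤ sc.length
theorem findP_char (sc tc : List Char) (hle : tc.length ≤ sc.length) (i : Nat)
    (hi : i ≤ tc.length) :
    decide (i ≤ findP tc.length sc tc 0) = Pall sc tc i := by
  rw [findP_eq]
  have hmin : min sc.length tc.length = tc.length := by omega
  by_cases h : misP sc tc = min sc.length tc.length
  · rw [if_pos h]
    have : decide (i ≤ tc.length) = true := by simpa using hi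
    rw [this]
    symm
    simp only [Pall, decide_eq_true_iff]
    intro k hk
    exact misP_ok sc tc k (by omega)
  · rw [if_neg h]
    have hlt : misP sc tc < tc.length := by
      have := misP_le sc tc; omega
    have hmm := misP_mismatch sc tc (by omega)
    simp only [Nat.zero_add]
    by_cases hip : i ≤ misP sc tc
    · rw [decide_eq_true (by omega : i ≤ misP sc tc)]
      symm
      simp only [Pall, decide_eq_true_iff]
      intro k hk
      exact misP_ok sc tc k (by omega)
    · rw [decide_eq_false (by omega : ¬ i ≤ misP sc tc)]
      symm
      simp only [Pall, decide_eq_false_iff_not]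
      intro hall
      have := hall (misP sc tc) (by omega)
      rw [hmm] at this
      exact Bool.noConfusion this

-- ---- characterisation of B's findQ ----

theorem findQ_char : ∀ (as bs : List Char) (j q : Nat), q ≤ j + 1 →
    ∀ m, decide (findQ as bs j q ≤ m)
      = decide (q ≤ m ∧ ∀ k, k < min as.length bs.length →
          okC (as.getD k ' ') (bs.getD k ' ') = false → j + k + 1 ≤ m) := by
  intro as
  induction as with
  | nil =>
    intro bs j q hq m
    cases bs <;> (apply decide_congr; simp [findQ])
  | cons a as ih =>
    intro bs j q hq m
    cases bs with
    | nil => apply decide_congr; simp [findQ]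
    | cons b bs =>
      simp only [findQ, okB_eq_okC]
      have hih := ih bs (j+1) (if okC a b = true then q else j+1)
        (by split <;> omega) m
      refine Eq.trans hih (decide_congr ?_)
      by_cases hok : okC a b = true
      · rw [if_pos hok]
        constructor
        · rintro ⟨h1, h2⟩
          refine ⟨h1, ?_⟩
          intro k hk hbad
          cases k with
          | zero => simp [List.getD, hok] at hbad
          | succ k =>
            have := h2 k (by simp at hk ⊢; omega) (by simpa [List.getD] using hbad)
            omega
        · rintro ⟨h1, h2⟩
          refine ⟨h1, ?_⟩
          intro k hk hbad
          have := h2 (k+1) (by simp at hk ⊢; omega) (by simpa [List.getD] using hbad)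
          omega
      · simp only [Bool.not_eq_true] at hok
        rw [if_neg (by simp [hok])]
        constructor
        · rintro ⟨h1, h2⟩
          refine ⟨by omega, ?_⟩
          intro k hk hbad
          cases k with
          | zero => omega
          | succ k =>
            have := h2 k (by simp at hk ⊢; omega) (by simpa [List.getD] using hbad)
            omega
        · rintro ⟨h1, h2⟩
          refine ⟨?_, ?_⟩
          · have := h2 0 (by simp) (by simpa [List.getD] using hok)
            omega
          · intro k hk hbad
            have := h2 (k+1) (by simp at hk ⊢; omega) (by simpa [List.getD] using hbad)
            omega

-- for i: decide (Q ≤ i) = Suf sc tc d i lent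
theorem findQ_suf (sc tc : List Char) (hle : tc.length ≤ sc.length) (i : Nat) :
    decide (findQ (sc.drop (sc.length - tc.length)) tc 0 0 ≤ i)
      = Suf sc tc (sc.length - tc.length) i tc.length := by
  set d := sc.length - tc.length with hd
  have hdroplen : (sc.drop d).length = tc.length := by
    simp [hd]; omega
  have hdrop : ∀ k, (sc.drop d).getD k ' ' = sc.getD (d + k) ' ' := by
    intro k
    simp [List.getD, List.getElem?_drop]
  rw [findQ_char (sc.drop d) tc 0 0 (by omega) i]
  simp only [Suf]
  apply decide_congr
  rw [hdroplen]
  have hmin : min tc.length tc.length = tc.length := by omega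
  rw [hmin]
  constructor
  · rintro ⟨-, h2⟩ k hk1 hk2
    by_contra hbad
    have : okC ((sc.drop d).getD k ' ') (tc.getD k ' ') = false := by
      rw [hdrop k]; simpa using hbad
    have := h2 k hk2 this
    omega
  · intro h
    refine ⟨Nat.zero_le i, ?_⟩
    intro k hk hbad
    rw [hdrop k] at hbad
    by_contra hm
    have := h k (by omega) hk
    rw [this] at hbad
    exact Bool.noConfusion hbad

-- ===== VERDICT (by name: the statement is the Claim_ definition above) =====
theorem solve_spec : Claim_equal_solve := by
  intro s t _ hpre
  unfold Spec_solve solve solve_alt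
  set sc := s.toList with hsc
  set tc := t.toList with htc
  have hle : tc.length ≤ sc.length := by
    have h1 : t.length ≤ s.length := hpre
    rw [htc, hsc]
    simpa [String.length_toList] using h1
  apply List.map_congr_left
  intro i hi
  have hi' : i ≤ tc.length := by
    rw [List.mem_range] at hi; omega
  have hpost := post_fold_getD sc tc tc.length tc.length (Nat.le_refl _) i
  have hpre' := pre_fold_getD sc tc (sc.length - tc.length) tc.length
    (List.replicate (tc.length + 1) true) (by simp) i
  have hP := findP_char sc tc hle i hi'
  have hQ := findQ_suf sc tc hle i
  have hps : postStep sc tc = (fun (post : List Bool) (i : Nat) =>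
      if okC (sc.getD i ' ') (tc.getD i ' ') then post.set (i+1) (post.getD i true)
      else post.set (i+1) false) := rfl
  have hqs : preStep sc tc (sc.length - tc.length) = (fun (pre : List Bool) (i : Nat) =>
      if okC (sc.getD (sc.length - tc.length + i) ' ') (tc.getD i ' ') then pre.set i (pre.getD (i+1) true)
      else pre.set i false) := rfl
  rw [hps] at hpost
  rw [hqs] at hpre'
  have hslice : PySem.List.slice sc (some ((sc.length : Int) - (tc.length : Int))) none
      = sc.drop (sc.length - tc.length) := by
    have hcast : ((sc.length : Int) - (tc.length : Int)) = ((sc.length - tc.length : Nat) : Int) := by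
      omega
    rw [hcast, PySem.List.slice_from_natCast]
  rw [hslice, hpost, hpre']
  rw [if_pos hi']
  have hrep : (List.replicate (tc.length + 1) true).getD i true = true :=
    getD_replicate_true _ _
  have hrep' : (List.replicate (tc.length + 1) true).getD tc.length true = true :=
    getD_replicate_true _ _
  by_cases hilt : i < tc.length
  · rw [if_pos hilt, hrep']
    rw [← hP, ← hQ]
    cases hq : decide (findQ (sc.drop (sc.length - tc.length)) tc 0 0 ≤ i) <;>
      cases hp : decide (i ≤ findP tc.length sc tc 0) <;>
      simp_all
  · have : i = tc.length := by omega
    subst this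
    rw [if_neg (Nat.lt_irrefl tc.length), hrep]
    have hsuf : Suf sc tc (sc.length - tc.length) tc.length tc.length = true := by
      simp only [Suf, decide_eq_true_iff]; intro k h1 h2; omega
    have hq2 : findQ (List.drop (sc.length - tc.length) sc) tc 0 0 ≤ tc.length :=
      of_decide_eq_true (hQ.trans hsuf)
    rw [← hP]
    cases hp : decide (tc.length ≤ findP tc.length sc tc 0) <;> simp_all
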